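-- pv_equiv track=rewrite | github.com/BerkZerker/Market-Sim | src/main.py | create_candlesticks
-- ===== SOURCE A (Python) =====
-- from collections import deque
--
-- def create_candlesticks(prices: deque, bucket_size: int = 5) -> list:
--     candlesticks = []
--     if len(prices) < bucket_size:
--         return []
--
--     for i in range(0, len(prices) - len(prices) % bucket_size, bucket_size):
--         bucket = list(prices)[i:i+bucket_size]
--         open_price = bucket[0]
--         close_price = bucket[-1]
--         high_price = max(bucket)
--         low_price = min(bucket)
--         candlesticks.append((open_price, high_price, low_price, close_price))
--     return candlesticks
-- ===== SOURCE B (Python) =====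
-- def create_candlesticks(prices, bucket_size=5):
--     candlesticks = []
--     o = h = l = 0
--     n = 0
--     for p in prices:
--         if n == 0:
--             o = h = l = p
--         else:
--             if p > h:
--                 h = p
--             if p < l:
--                 l = p
--         n += 1
--         if n == bucket_size:
--             candlesticks.append((o, h, l, p))
--             n = 0
--     return candlesticks
-- ===== Notes on version B (the rewrite author's own statement) =====
-- stated objective: faster
-- what changed: Replaces the index-range loop that copies the whole deque and slices a bucket each iteration (then scans it with max/min) by a single streaming pass that maintains running open/high/low/close and a counter, emitting a candle each time the counter reaches bucket_size.
import Mathlib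
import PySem

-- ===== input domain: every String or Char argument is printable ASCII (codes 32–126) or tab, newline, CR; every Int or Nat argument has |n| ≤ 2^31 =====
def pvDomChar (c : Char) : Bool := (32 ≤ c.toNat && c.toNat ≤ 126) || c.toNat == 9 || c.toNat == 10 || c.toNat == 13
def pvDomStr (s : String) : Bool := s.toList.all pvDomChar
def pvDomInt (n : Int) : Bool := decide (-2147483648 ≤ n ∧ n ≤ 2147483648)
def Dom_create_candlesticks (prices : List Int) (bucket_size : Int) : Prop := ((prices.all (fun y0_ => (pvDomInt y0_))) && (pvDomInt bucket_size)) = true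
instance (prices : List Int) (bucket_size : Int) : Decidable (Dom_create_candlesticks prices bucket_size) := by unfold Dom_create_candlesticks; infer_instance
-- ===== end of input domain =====

-- B replaces A's per-bucket full-copy-and-slice loop (with max/min rescans) by one streaming
-- pass keeping running open/high/low/close and a counter: asymptotically faster.


-- ===== PORT A =====
-- literal port of A; the .getD 0 defaults on pyGet?/max?/min? are never taken on admitted
-- inputs, since every bucket produced by the range loop is nonempty
def create_candlesticks (prices : List Int) (bucket_size : Int) : List (Int × Int × Int × Int) :=
  if (prices.length : Int) < bucket_size then []
  else
    (PySem.List.pyRange 0 ((prices.length : Int) - PySem.Int.mod (prices.length : Int) bucket_size) bucket_size).foldl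
      (fun candlesticks i =>
        let bucket := PySem.List.slice prices (some i) (some (i + bucket_size))
        let open_price := (PySem.List.pyGet? bucket 0).getD 0
        let close_price := (PySem.List.pyGet? bucket (-1)).getD 0
        let high_price := (PySem.List.max? bucket (fun y => y)).getD 0
        let low_price := (PySem.List.min? bucket (fun y => y)).getD 0
        candlesticks ++ [(open_price, high_price, low_price, close_price)]) []

-- ===== PORT B =====
-- one step of B's streaming loop: state = (candlesticks, open, high, low, counter)
def altStep (bucket_size : Int)
    (st : List (Int × Int × Int × Int) × Int × Int × Int × Int) (p : Int) :
    List (Int × Int × Int × Int) × Int × Int × Int × Int :=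
  let (out, o, h, l, n) := st
  let o := if n = 0 then p else o
  let h := if n = 0 then p else if p > h then p else h
  let l := if n = 0 then p else if p < l then p else l
  let n := n + 1
  if n = bucket_size then (out ++ [(o, h, l, p)], o, h, l, 0) else (out, o, h, l, n)

def create_candlesticks_alt (prices : List Int) (bucket_size : Int) : List (Int × Int × Int × Int) :=
  (prices.foldl (altStep bucket_size) ([], 0, 0, 0, 0)).1

-- ===== PRECONDITION & SPEC =====
-- Pre_ excludes exactly bucket_size = 0, where A raises ZeroDivisionError (len % 0)
def Pre_create_candlesticks (prices : List Int) (bucket_size : Int) : Prop := bucket_size ≠ 0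
instance (prices : List Int) (bucket_size : Int) : Decidable (Pre_create_candlesticks prices bucket_size) := by unfold Pre_create_candlesticks; infer_instance

def pvWitness_create_candlesticks : List Int × Int := ([3, 1, 4, 1, 5, 9], 2)

def Spec_create_candlesticks (prices : List Int) (bucket_size : Int) (out : List (Int × Int × Int × Int)) : Prop := out = create_candlesticks_alt prices bucket_size
instance (prices : List Int) (bucket_size : Int) (out : List (Int × Int × Int × Int)) : Decidable (Spec_create_candlesticks prices bucket_size out) := by unfold Spec_create_candlesticks; infer_instance

-- ===== CLAIM (what is proved, stated in full; the proofs are below) =====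
def Claim_equal_create_candlesticks : Prop := ∀ (prices : List Int) (bucket_size : Int), Dom_create_candlesticks prices bucket_size → Pre_create_candlesticks prices bucket_size → Spec_create_candlesticks prices bucket_size (create_candlesticks prices bucket_size)

-- ===== LEMMAS AND PROOFS =====

-- the OHLC tuple of one (nonempty) bucket
def chunkOHLC : List Int → Int × Int × Int × Int
  | [] => (0, 0, 0, 0)
  | p :: t => (p, t.foldl max p, t.foldl min p, ((p :: t).getLast?).getD 0)

-- reference form: the full buckets of size b, front to back
def chunkList (b : Nat) (xs : List Int) : List (Int × Int × Int × Int) :=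
  if h : 0 < b ∧ b ≤ xs.length then
    chunkOHLC (xs.take b) :: chunkList b (xs.drop b)
  else []
termination_by xs.length
decreasing_by simp; omega

theorem chunkList_small {b : Nat} {xs : List Int} (h : xs.length < b) : chunkList b xs = [] := by
  rw [chunkList]; simp; omega

theorem if_gt_eq_max (h p : Int) : (if p > h then p else h) = max h p := by
  by_cases hc : p > h
  · rw [if_pos hc, max_eq_right hc.le]
  · rw [if_neg hc, max_eq_left (not_lt.mp hc)]

theorem if_lt_eq_min (l p : Int) : (if p < l then p else l) = min l p := by
  by_cases hc : p < l
  · rw [if_pos hc, min_eq_right hc.le]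
  · rw [if_neg hc, min_eq_left (not_lt.mp hc)]


-- B's loop never emits while the counter cannot reach bucket_size
theorem altStep_no_emit (bs : Int) :
    ∀ (t : List Int) (out : List (Int × Int × Int × Int)) (o h l n : Int),
      0 ≤ n → ((n + t.length : Int) < bs ∨ bs ≤ 0) →
      (t.foldl (altStep bs) (out, o, h, l, n)).1 = out := by
  intro t
  induction t with
  | nil => intro out o h l n _ _; simp
  | cons p t ih =>
    intro out o h l n hn hlt
    have hne : ¬ (n + 1 = bs) := by
      rcases hlt with h1 | h1
      · simp at h1; omega
      · omega
    simp only [List.foldl_cons, altStep, hne, if_neg hne]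
    exact ih out _ _ _ (n + 1) (by omega)
      (by rcases hlt with h1 | h1
          · left; simp at h1 ⊢; omega
          · right; exact h1)

theorem getLast?_getD_cons (p : Int) (t : List Int) (ht : t ≠ []) :
    ((p :: t).getLast?).getD 0 = (t.getLast?).getD 0 := by
  cases t with
  | nil => exact absurd rfl ht
  | cons q r => simp [List.getLast?_cons_cons]

-- finishing one bucket from the middle: counter n, remaining t exactly fills it
theorem altStep_run (bs : Int) :
    ∀ (t : List Int) (out : List (Int × Int × Int × Int)) (o h l n : Int),
      1 ≤ n → n < bs → n + t.length = bs →
      t.foldl (altStep bs) (out, o, h, l, n) =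
        (out ++ [(o, t.foldl max h, t.foldl min l, (t.getLast?).getD 0)],
          o, t.foldl max h, t.foldl min l, 0) := by
  intro t
  induction t with
  | nil => intro out o h l n h1 h2 h3; simp at h3; omega
  | cons p t ih =>
    intro out o h l n h1 h2 h3
    have hn0 : ¬ (n = 0) := by omega
    by_cases hb : n + 1 = bs
    · have ht : t = [] := by
        have : t.length = 0 := by simp at h3; omega
        exact List.eq_nil_of_length_eq_zero this
      subst ht
      simp [altStep, hn0, hb, if_gt_eq_max, if_lt_eq_min]
    · have htne : t ≠ [] := by
        intro he; subst he; simp at h3; omega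
      simp only [List.foldl_cons, altStep, if_neg hn0, if_neg hb]
      rw [ih out o (if p > h then p else h) (if p < l then p else l) (n + 1)
            (by omega) (by omega) (by simp at h3 ⊢; omega)]
      rw [if_gt_eq_max, if_lt_eq_min, getLast?_getD_cons p t htne]

-- one whole bucket, starting with counter 0
theorem altStep_bucket (bs : Int) (hbs : 1 ≤ bs) (c : List Int)
    (hc : (c.length : Int) = bs) (out : List (Int × Int × Int × Int)) (o h l : Int) :
    c.foldl (altStep bs) (out, o, h, l, 0) =
      (out ++ [chunkOHLC c], (chunkOHLC c).1, (chunkOHLC c).2.1, (chunkOHLC c).2.2.1, 0) := by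
  cases c with
  | nil => simp at hc; omega
  | cons p t =>
    by_cases hb1 : (1 : Int) = bs
    · have ht : t = [] := by
        have : t.length = 0 := by simp at hc; omega
        exact List.eq_nil_of_length_eq_zero this
      subst ht
      simp [altStep, hb1, chunkOHLC]
    · simp only [List.foldl_cons, altStep]
      rw [if_neg (by omega : ¬ ((0:Int) + 1 = bs))]
      simp only [if_pos (rfl : (0:Int) = 0), if_true]
      have := altStep_run bs t out p p p (0 + 1) (by omega) (by omega)
        (by simp at hc ⊢; omega)
      rw [this]
      have htne : t ≠ [] := by
        intro he; subst he; simp at hc; omega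
      simp [chunkOHLC, getLast?_getD_cons p t htne]

-- B equals the reference chunk decomposition for positive bucket size
theorem alt_chunks (bs : Int) (hbs : 1 ≤ bs) :
    ∀ (xs : List Int) (out : List (Int × Int × Int × Int)) (o h l : Int),
      (xs.foldl (altStep bs) (out, o, h, l, 0)).1 = out ++ chunkList bs.toNat xs := by
  intro xs
  induction hw : xs.length using Nat.strong_induction_on generalizing xs with
  | _ n ih =>
    intro out o h l
    subst hw
    by_cases hsmall : (xs.length : Int) < bs
    · rw [altStep_no_emit bs xs out o h l 0 (by omega) (by left; omega)]
      rw [chunkList_small (by omega)]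
      simp
    · have hble : bs.toNat ≤ xs.length := by omega
      have hxs : xs = xs.take bs.toNat ++ xs.drop bs.toNat := (List.take_append_drop _ _).symm
      conv_lhs => rw [hxs]
      rw [List.foldl_append]
      rw [altStep_bucket bs hbs (xs.take bs.toNat)
            (by simp [List.length_take]; omega) out o h l]
      rw [ih (xs.drop bs.toNat).length (by simp; omega) (xs.drop bs.toNat) rfl]
      rw [show chunkList bs.toNat xs =
            chunkOHLC (xs.take bs.toNat) :: chunkList bs.toNat (xs.drop bs.toNat) from by
          rw [chunkList]; rw [dif_pos ⟨by omega, hble⟩]]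
      simp

-- A's per-bucket tuple equals chunkOHLC on a nonempty bucket
theorem ohlcA_eq (p : Int) (t : List Int) :
    ((PySem.List.pyGet? (p :: t) 0).getD 0,
     (PySem.List.max? (p :: t) (fun y => y)).getD 0,
     (PySem.List.min? (p :: t) (fun y => y)).getD 0,
     (PySem.List.pyGet? (p :: t) (-1)).getD 0) = chunkOHLC (p :: t) := by
  rw [PySem.List.pyGet?_zero_cons, PySem.List.max?_id_cons, PySem.List.min?_id_cons,
      PySem.List.pyGet?_neg_one]
  simp [chunkOHLC]

theorem foldl_append_map' {α : Type} (g : α → Int × Int × Int × Int) :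
    ∀ (l : List α) (init : List (Int × Int × Int × Int)),
      l.foldl (fun acc i => acc ++ [g i]) init = init ++ l.map g := by
  intro l
  induction l with
  | nil => simp
  | cons x t ih => intro init; simp [List.foldl_cons, ih]

-- the index-range/slice form equals the chunk decomposition
theorem range_chunks (b : Nat) (hb : 0 < b) :
    ∀ (q : Nat) (xs : List Int), b * q ≤ xs.length → xs.length < b * q + b →
      (List.range q).map (fun k =>
        match (xs.drop (b * k)).take b with
        | [] => (0, 0, 0, 0)
        | p :: t => chunkOHLC (p :: t)) = chunkList b xs := by
  intro q
  induction q with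
  | zero =>
    intro xs _ h2
    rw [chunkList_small (by omega)]
    simp
  | succ q ih =>
    intro xs h1 h2
    rw [List.range_succ_eq_map, List.map_cons, List.map_map]
    have hble : b ≤ xs.length := by nlinarith
    rw [chunkList, dif_pos ⟨hb, hble⟩]
    refine congr_arg₂ List.cons ?_ ?_
    · cases hc : xs.take b with
      | nil =>
        exfalso
        have h' : (xs.take b).length = 0 := by rw [hc]; rfl
        rw [List.length_take] at h'
        omega
      | cons p t => simp [hc]
    · rw [← ih (xs.drop b) (by rw [List.length_drop]; have h3 : b * (q + 1) = b * q + b := (by ring); omega) (by rw [List.length_drop]; have h3 : b * (q + 1) = b * q + b := (by ring); omega)]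
      apply List.map_congr_left
      intro k _
      simp only [Function.comp_apply]
      have hh : b * (k + 1) = b + b * k := by ring
      rw [hh, ← List.drop_drop]

-- A equals the reference chunk decomposition for positive bucket size
theorem A_chunks (bs : Int) (hbs : 1 ≤ bs) (prices : List Int) :
    create_candlesticks prices bs = chunkList bs.toNat prices := by
  set b := bs.toNat with hbdef
  have hb : 0 < b := by omega
  have hcast : ((b : Nat) : Int) = bs := Int.toNat_of_nonneg (by omega)
  by_cases hsmall : (prices.length : Int) < bs
  · rw [create_candlesticks, if_pos hsmall, chunkList_small (by omega)]
  · have hble : b ≤ prices.length := by omega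
    rw [create_candlesticks, if_neg hsmall]
    set L := prices.length with hL
    set q := L / b with hq
    have hq1 : 1 ≤ q := (Nat.one_le_div_iff hb).mpr hble
    -- the stop bound is b*q
    have hmod : PySem.Int.mod (L : Int) bs = ((L % b : Nat) : Int) := by
      rw [← hcast]; exact PySem.Int.mod_natCast L b
    have hmd : L % b + b * q = L := by rw [hq]; exact Nat.mod_add_div L b
    have hmlt : L % b < b := Nat.mod_lt L hb
    have hstop : (L : Int) - PySem.Int.mod (L : Int) bs = ((b * q : Nat) : Int) := by
      rw [hmod]
      push_cast
      omega
    rw [hstop]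
    -- the range is [0, b, 2b, …, (q-1)b]
    have hrange : PySem.List.pyRange 0 ((b * q : Nat) : Int) bs =
        (List.range q).map (fun k => ((b * k : Nat) : Int)) := by
      rw [PySem.List.pyRange_of_pos 0 _ (by omega : (0:Int) < bs)]
      have hlt : (0 : Int) < ((b * q : Nat) : Int) := by
        have : 0 < b * q := Nat.mul_pos hb hq1
        exact_mod_cast this
      rw [if_pos hlt]
      have hcount : ((((b * q : Nat) : Int) - 0 + bs - 1) / bs).toNat = q := by
        rw [← hcast]
        have h1 : (((b * q : Nat) : Int) - 0 + ((b : Nat) : Int) - 1) = (((b * q + b - 1 : Nat)) : Int) := by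
          push_cast; omega
        rw [h1, ← Int.natCast_div, Int.toNat_natCast]
        have h2 : b * q + b - 1 = (b - 1) + b * q := by omega
        rw [h2, Nat.add_mul_div_left _ _ hb, Nat.div_eq_of_lt (by omega)]
        omega
      rw [hcount]
      apply List.map_congr_left
      intro k _
      rw [← hcast]
      push_cast
      ring
    rw [hrange]
    rw [List.foldl_map]
    have hfold :
        (List.range q).foldl
          (fun (candlesticks : List (Int × Int × Int × Int)) (k : Nat) =>
            candlesticks ++
              [((PySem.List.pyGet? (PySem.List.slice prices (some ((b * k : Nat) : Int)) (some (((b * k : Nat) : Int) + bs))) 0).getD 0,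
                (PySem.List.max? (PySem.List.slice prices (some ((b * k : Nat) : Int)) (some (((b * k : Nat) : Int) + bs))) (fun y => y)).getD 0,
                (PySem.List.min? (PySem.List.slice prices (some ((b * k : Nat) : Int)) (some (((b * k : Nat) : Int) + bs))) (fun y => y)).getD 0,
                (PySem.List.pyGet? (PySem.List.slice prices (some ((b * k : Nat) : Int)) (some (((b * k : Nat) : Int) + bs))) (-1)).getD 0)])
          [] =
        (List.range q).map (fun k =>
          match (prices.drop (b * k)).take b with
          | [] => ((0 : Int), (0 : Int), (0 : Int), (0 : Int))
          | p :: t => chunkOHLC (p :: t)) := by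
      rw [foldl_append_map']
      simp only [List.nil_append]
      apply List.map_congr_left
      intro k hk
      have hslice : PySem.List.slice prices (some ((b * k : Nat) : Int)) (some (((b * k : Nat) : Int) + bs)) =
          (prices.drop (b * k)).take b := by
        rw [← hcast, ← Int.natCast_add]
        exact PySem.List.slice_natCast_add prices (b * k) b
      rw [hslice]
      have hklt : k < q := List.mem_range.mp hk
      have hne : (prices.drop (b * k)).take b ≠ [] := by
        intro he
        have h' : ((prices.drop (b * k)).take b).length = 0 := by rw [he]; rfl
        rw [List.length_take, List.length_drop] at h'
        have hbq : b * (k + 1) ≤ b * q := Nat.mul_le_mul le_rfl hklt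
        have hmul : b * (k + 1) = b * k + b := Nat.mul_succ b k
        omega
      cases hc : (prices.drop (b * k)).take b with
      | nil => exact absurd hc hne
      | cons p t => exact ohlcA_eq p t
    rw [hfold]
    apply range_chunks b hb q prices
    · omega
    · omega

-- A returns [] for negative bucket size (the range is empty)
theorem A_neg (bs : Int) (hbs : bs < 0) (prices : List Int) :
    create_candlesticks prices bs = [] := by
  rw [create_candlesticks, if_neg (by omega : ¬ ((prices.length : Int) < bs))]
  have hmod := PySem.Int.mod_neg_bounds (prices.length : Int) hbs
  have hstop : ¬ ((prices.length : Int) - PySem.Int.mod (prices.length : Int) bs < 0) := by omega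
  rw [PySem.List.pyRange]
  rw [if_neg (by omega : ¬ (bs = 0))]
  simp only [if_neg (by omega : ¬ ((0:Int) < bs)), if_neg hstop]
  simp


-- ===== VERDICT (by name: the statement is the Claim_ definition above) =====
theorem create_candlesticks_spec : Claim_equal_create_candlesticks := by
  intro prices bs _ hpre
  unfold Spec_create_candlesticks create_candlesticks_alt
  rcases lt_trichotomy bs 0 with hneg | hz | hpos
  · rw [altStep_no_emit bs prices [] 0 0 0 0 (by omega) (by right; omega)]
    rw [A_neg bs hneg prices]
  · exact absurd hz hpre
  · rw [alt_chunks bs (by omega) prices [] 0 0 0]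
    rw [A_chunks bs (by omega) prices]
    simp
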